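-- pv_equiv track=rewrite | github.com/Amin-Mohamed1/ConnectFourGame | BackEnd/Services/Heuristic.py | connected_threes_horizontal
-- ===== SOURCE A (Python) =====
-- def connected_threes_horizontal(board: list[list[str]], piece: str) -> int:
--     score: int = 0
--     for row in range(len(board)):
--         piece_count: int = 0
--         for col in range(len(board[0])):
--             if board[row][col] == piece:
--                 piece_count += 1
--                 if piece_count >= 3:
--                     if col + 1 < len(board[0]) and board[row][col + 1] == '':
--                         score += 1
--                     if col - 3 >= 0 and board[row][col - 3] == '':
--                         score += 1
--             else:
--                 piece_count = 0
--     return score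
-- ===== SOURCE B (Python) =====
-- def connected_threes_horizontal(board: list[list[str]], piece: str) -> int:
--     # Window-based rewrite: instead of maintaining a running piece counter with
--     # reset logic, test at each column whether the 3-cell window ending there is
--     # all `piece`, then credit empty neighbours directly.
--     if not board:
--         return 0
--     width = len(board[0])
--     total = 0
--     for row in board:
--         for col in range(2, width):
--             if row[col - 2] == piece and row[col - 1] == piece and row[col] == piece:
--                 if col + 1 < width and row[col + 1] == '':
--                     total += 1
--                 if col >= 3 and row[col - 3] == '':
--                     total += 1
--     return total
-- ===== Notes on version B (the rewrite author's own statement) =====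
-- stated objective: alternative
-- what changed: Replaces A's stateful running piece_count with reset logic by a stateless per-column test of the 3-cell window ending at that column, crediting empty neighbours directly.
import Mathlib
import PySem

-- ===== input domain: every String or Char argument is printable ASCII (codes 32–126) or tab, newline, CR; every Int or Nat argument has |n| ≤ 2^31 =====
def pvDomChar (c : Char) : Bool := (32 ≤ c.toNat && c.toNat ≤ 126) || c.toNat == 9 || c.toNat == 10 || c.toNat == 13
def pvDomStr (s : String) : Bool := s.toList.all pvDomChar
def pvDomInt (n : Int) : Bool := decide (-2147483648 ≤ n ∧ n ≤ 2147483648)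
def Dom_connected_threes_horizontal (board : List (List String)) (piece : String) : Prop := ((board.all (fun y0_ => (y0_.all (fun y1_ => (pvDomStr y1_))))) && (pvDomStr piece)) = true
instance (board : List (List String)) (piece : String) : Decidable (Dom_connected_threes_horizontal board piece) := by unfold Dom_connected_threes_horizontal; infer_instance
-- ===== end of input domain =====

-- B replaces A's running piece_count with a direct 3-cell-window test per column (different decomposition, same cost).

-- ===== PORT A =====
-- one step of A's inner column loop: state is (piece_count, score)
def pvStepA (w : Int) (r : List String) (piece : String) (st : Int × Int) (col : Int) : Int × Int :=
  if PySem.List.pyGetD r col "" = piece then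
    if st.1 + 1 ≥ 3 then
      let s1 := if col + 1 < w ∧ PySem.List.pyGetD r (col + 1) "" = "" then st.2 + 1 else st.2
      let s2 := if col - 3 ≥ 0 ∧ PySem.List.pyGetD r (col - 3) "" = "" then s1 + 1 else s1
      (st.1 + 1, s2)
    else (st.1 + 1, st.2)
  else (0, st.2)

def connected_threes_horizontal (board : List (List String)) (piece : String) : Int :=
  (PySem.List.pyRange 0 (board.length : Int) 1).foldl
    (fun score row =>
      ((PySem.List.pyRange 0 ((PySem.List.pyGetD board 0 []).length : Int) 1).foldl
        (pvStepA ((PySem.List.pyGetD board 0 []).length : Int) (PySem.List.pyGetD board row []) piece)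
        ((0 : Int), score)).2)
    0

-- ===== PORT B =====
-- one step of B's inner column loop: window test at col, then the two neighbour credits
def pvStepB (w : Int) (r : List String) (piece : String) (t : Int) (col : Int) : Int :=
  if PySem.List.pyGetD r (col - 2) "" = piece ∧ PySem.List.pyGetD r (col - 1) "" = piece ∧
      PySem.List.pyGetD r col "" = piece then
    let t1 := if col + 1 < w ∧ PySem.List.pyGetD r (col + 1) "" = "" then t + 1 else t
    if 3 ≤ col ∧ PySem.List.pyGetD r (col - 3) "" = "" then t1 + 1 else t1
  else t

def connected_threes_horizontal_alt (board : List (List String)) (piece : String) : Int :=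
  match board with
  | [] => 0
  | r0 :: _ =>
    board.foldl
      (fun total r =>
        (PySem.List.pyRange 2 (r0.length : Int) 1).foldl (pvStepB (r0.length : Int) r piece) total)
      0

-- ===== PRECONDITION & SPEC =====
-- Pre_ excludes exactly the ragged boards on which Python A raises IndexError
-- (a row shorter than the first row, with the first row nonempty).
def Pre_connected_threes_horizontal (board : List (List String)) (piece : String) : Prop :=
  ∀ r ∈ board, (board.headD []).length ≤ r.length
instance (board : List (List String)) (piece : String) : Decidable (Pre_connected_threes_horizontal board piece) := by unfold Pre_connected_threes_horizontal; infer_instance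

def pvWitness_connected_threes_horizontal : List (List String) × String :=
  ([["x", "x", "x", ""]], "x")

def Spec_connected_threes_horizontal (board : List (List String)) (piece : String) (out : Int) : Prop := out = connected_threes_horizontal_alt board piece
instance (board : List (List String)) (piece : String) (out : Int) : Decidable (Spec_connected_threes_horizontal board piece out) := by unfold Spec_connected_threes_horizontal; infer_instance

-- ===== CLAIM (what is proved, stated in full; the proofs are below) =====
def Claim_equal_connected_threes_horizontal : Prop := ∀ (board : List (List String)) (piece : String), Dom_connected_threes_horizontal board piece → Pre_connected_threes_horizontal board piece → Spec_connected_threes_horizontal board piece (connected_threes_horizontal board piece)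

-- ===== LEMMAS AND PROOFS =====

-- length of the run of `piece` cells ending just before column n (A's piece_count)
def pvTrail (r : List String) (piece : String) : Nat → Int
  | 0 => 0
  | n + 1 => if PySem.List.pyGetD r (n : Int) "" = piece then pvTrail r piece n + 1 else 0

theorem pvTrail_nonneg (r : List String) (piece : String) (n : Nat) : 0 ≤ pvTrail r piece n := by
  induction n with
  | zero => simp [pvTrail]
  | succ m ih => simp only [pvTrail]; split <;> omega

theorem pvTrail_ge_one (r : List String) (piece : String) (n : Nat) :
    1 ≤ pvTrail r piece n ↔ (1 ≤ n ∧ PySem.List.pyGetD r ((n : Int) - 1) "" = piece) := by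
  cases n with
  | zero => simp [pvTrail]
  | succ m =>
    have h0 := pvTrail_nonneg r piece m
    have hc : ((m + 1 : Nat) : Int) - 1 = (m : Int) := by push_cast; ring
    simp only [pvTrail, hc]
    split <;> rename_i h
    · simp [h]; omega
    · exact ⟨fun hg => absurd hg (by norm_num), fun hg => absurd hg.2 h⟩

theorem pvTrail_ge_two (r : List String) (piece : String) (n : Nat) :
    2 ≤ pvTrail r piece n ↔
      (2 ≤ n ∧ PySem.List.pyGetD r ((n : Int) - 1) "" = piece ∧
        PySem.List.pyGetD r ((n : Int) - 2) "" = piece) := by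
  cases n with
  | zero => simp [pvTrail]
  | succ m =>
    have hc1 : ((m + 1 : Nat) : Int) - 1 = (m : Int) := by push_cast; ring
    have hc2 : ((m + 1 : Nat) : Int) - 2 = (m : Int) - 1 := by push_cast; ring
    simp only [pvTrail, hc1, hc2]
    split <;> rename_i h
    · have h1 := pvTrail_ge_one r piece m
      constructor
      · intro hg
        have : 1 ≤ pvTrail r piece m := by omega
        rw [h1] at this
        exact ⟨by omega, h, this.2⟩
      · intro ⟨hm, _, hp2⟩
        have : 1 ≤ pvTrail r piece m := h1.mpr ⟨by omega, hp2⟩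
        omega
    · exact ⟨fun hg => absurd hg (by norm_num), fun hg => absurd hg.2.1 h⟩

-- the inner column loops of A and B agree row by row
theorem pvRow_eq (w : Int) (r : List String) (piece : String) (s : Int) (n : Nat) :
    (PySem.List.pyRange 0 (n : Int) 1).foldl (pvStepA w r piece) ((0 : Int), s)
      = (pvTrail r piece n, (PySem.List.pyRange 2 (n : Int) 1).foldl (pvStepB w r piece) s) := by
  induction n with
  | zero =>
    rw [PySem.List.pyRange_one_eq_nil (by omega), PySem.List.pyRange_one_eq_nil (by omega)]
    simp [pvTrail]
  | succ m ih =>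
    have hc : ((m + 1 : Nat) : Int) = (m : Int) + 1 := by push_cast; ring
    rw [hc, PySem.List.pyRange_one_succ_right (by omega : (0:Int) ≤ (m : Int)), List.foldl_append, ih]
    set X := (PySem.List.pyRange 2 (m : Int) 1).foldl (pvStepB w r piece) s with hX
    by_cases hm2 : 2 ≤ (m : Int)
    · rw [PySem.List.pyRange_one_succ_right (by omega : (2:Int) ≤ (m : Int)), List.foldl_append]
      simp only [List.foldl_cons, List.foldl_nil]
      by_cases hp : PySem.List.pyGetD r (m : Int) "" = piece
      · by_cases hge : 2 ≤ pvTrail r piece m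
        · have hw := (pvTrail_ge_two r piece m).mp hge
          have hwin : PySem.List.pyGetD r ((m : Int) - 2) "" = piece ∧
              PySem.List.pyGetD r ((m : Int) - 1) "" = piece ∧
              PySem.List.pyGetD r (m : Int) "" = piece := ⟨hw.2.2, hw.2.1, hp⟩
          have h3 : pvTrail r piece m + 1 ≥ 3 := by omega
          simp only [pvStepA, pvStepB, pvTrail, if_pos hp, if_pos hwin, if_pos h3]
          have hiff : ((m : Int) - 3 ≥ 0 ∧ PySem.List.pyGetD r ((m : Int) - 3) "" = "")
              ↔ (3 ≤ (m : Int) ∧ PySem.List.pyGetD r ((m : Int) - 3) "" = "") :=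
            ⟨fun h => ⟨by omega, h.2⟩, fun h => ⟨by omega, h.2⟩⟩
          rw [if_congr hiff rfl rfl]
        · have hnw : ¬ (PySem.List.pyGetD r ((m : Int) - 2) "" = piece ∧
              PySem.List.pyGetD r ((m : Int) - 1) "" = piece ∧
              PySem.List.pyGetD r (m : Int) "" = piece) := by
            intro ⟨h2, h1, _⟩
            exact hge ((pvTrail_ge_two r piece m).mpr ⟨by omega, h1, h2⟩)
          simp only [pvStepA, pvStepB, pvTrail, if_pos hp, if_neg hnw,
            if_neg (by omega : ¬ pvTrail r piece m + 1 ≥ 3)]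
          rfl
      · have hnw : ¬ (PySem.List.pyGetD r ((m : Int) - 2) "" = piece ∧
            PySem.List.pyGetD r ((m : Int) - 1) "" = piece ∧
            PySem.List.pyGetD r (m : Int) "" = piece) := fun h => hp h.2.2
        simp only [pvStepA, pvStepB, pvTrail, if_neg hp, if_neg hnw]
        rfl
    · rw [PySem.List.pyRange_one_eq_nil (by omega : (m : Int) + 1 ≤ 2)] at *
      rw [PySem.List.pyRange_one_eq_nil (by omega : (m : Int) ≤ 2)] at hX
      simp only [List.foldl_cons, List.foldl_nil]
      have hlt : ¬ 2 ≤ pvTrail r piece m := by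
        intro hge
        have := ((pvTrail_ge_two r piece m).mp hge).1
        omega
      by_cases hp : PySem.List.pyGetD r (m : Int) "" = piece
      · simp only [pvStepA, pvTrail, if_pos hp, if_neg (by omega : ¬ pvTrail r piece m + 1 ≥ 3)]
        simp only [hX, List.foldl_nil]
      · simp only [pvStepA, pvTrail, if_neg hp]
        simp only [hX, List.foldl_nil]

-- ===== VERDICT (by name: the statement is the Claim_ definition above) =====
theorem connected_threes_horizontal_spec : Claim_equal_connected_threes_horizontal := by
  intro board piece _ _
  unfold Spec_connected_threes_horizontal
  cases board with
  | nil => rfl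
  | cons r0 rest =>
    unfold connected_threes_horizontal connected_threes_horizontal_alt
    rw [PySem.List.foldl_pyRange_zero_pyGetD' (r0 :: rest) ([] : List String)
      (fun score r =>
        ((PySem.List.pyRange 0 ((PySem.List.pyGetD (r0 :: rest) 0 []).length : Int) 1).foldl
          (pvStepA ((PySem.List.pyGetD (r0 :: rest) 0 []).length : Int) r piece)
          ((0 : Int), score)).2) 0]
    simp only [PySem.List.pyGetD_zero_cons]
    congr 1
    funext score r
    have := pvRow_eq (r0.length : Int) r piece score r0.length
    exact congrArg Prod.snd this
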